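-- pv_equiv track=rewrite | github.com/maloneygoat/Statisticalphysics | RandomWalk-SquareLattice/randomwalkendpoints.py | is_self_avoiding
-- ===== SOURCE A (Python) =====
-- def is_self_avoiding(path):
--     x, y = 0, 0
--     visited = {(x, y)}
--     for dx, dy in path:
--         x += dx
--         y += dy
--         if (x, y) in visited:
--             return False
--         visited.add((x, y))
--     return True
-- ===== SOURCE B (Python) =====
-- def is_self_avoiding(path):
--     x, y = 0, 0
--     positions = [(0, 0)]
--     for dx, dy in path:
--         x += dx
--         y += dy
--         positions.append((x, y))
--     return len(positions) == len(set(positions))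
-- ===== Notes on version B (the rewrite author's own statement) =====
-- stated objective: alternative
-- what changed: Replaces the incremental per-step membership check with early return by a two-phase structure: materialize the full list of visited positions, then compare its length with the size of its set.
import Mathlib
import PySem

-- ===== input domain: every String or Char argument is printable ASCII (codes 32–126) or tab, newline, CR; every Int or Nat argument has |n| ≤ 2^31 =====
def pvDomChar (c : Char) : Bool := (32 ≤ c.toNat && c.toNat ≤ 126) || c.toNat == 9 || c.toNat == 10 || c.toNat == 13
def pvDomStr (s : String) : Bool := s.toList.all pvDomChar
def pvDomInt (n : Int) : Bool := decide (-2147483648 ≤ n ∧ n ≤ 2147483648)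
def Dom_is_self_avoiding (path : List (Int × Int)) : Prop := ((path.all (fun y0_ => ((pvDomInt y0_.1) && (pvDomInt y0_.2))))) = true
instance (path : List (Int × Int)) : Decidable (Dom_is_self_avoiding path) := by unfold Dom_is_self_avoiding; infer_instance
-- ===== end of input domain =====

-- ===== PORT A =====
-- B re-implements A as a two-phase materialize-then-deduplicate check; proved to return the same value (objective: alternative).
-- loop of A: walk the path, tracking the current position and the set of visited positions, with early return on a revisit
def isaGo : Int → Int → List (Int × Int) → PySem.Set (Int × Int) → Bool
  | _, _, [], _ => true
  | x, y, (dx, dy) :: rest, visited =>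
    let x' := x + dx
    let y' := y + dy
    if (x', y') ∈ visited then false
    else isaGo x' y' rest (PySem.Set.add visited (x', y'))

def is_self_avoiding (path : List (Int × Int)) : Bool :=
  isaGo 0 0 path (PySem.Set.ofList [((0 : Int), (0 : Int))])

-- ===== PORT B =====
-- loop of B: accumulate the list of positions reached after each step
def bPositions : Int → Int → List (Int × Int) → List (Int × Int)
  | _, _, [] => []
  | x, y, (dx, dy) :: rest => (x + dx, y + dy) :: bPositions (x + dx) (y + dy) rest

def is_self_avoiding_alt (path : List (Int × Int)) : Bool :=
  let positions := ((0 : Int), (0 : Int)) :: bPositions 0 0 path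
  decide (positions.length = (PySem.Set.ofList positions).length)

-- ===== PRECONDITION & SPEC =====
def Spec_is_self_avoiding (path : List (Int × Int)) (out : Bool) : Prop := out = is_self_avoiding_alt path
instance (path : List (Int × Int)) (out : Bool) : Decidable (Spec_is_self_avoiding path out) := by unfold Spec_is_self_avoiding; infer_instance

-- ===== CLAIM (what is proved, stated in full; the proofs are below) =====
def Claim_equal_is_self_avoiding : Prop := ∀ (path : List (Int × Int)), Dom_is_self_avoiding path → Spec_is_self_avoiding path (is_self_avoiding path)

-- ===== LEMMAS AND PROOFS =====

theorem pv_ofList_sublist (xs : List (Int × Int)) : List.Sublist (PySem.Set.ofList xs) xs := by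
  induction xs with
  | nil => simp [PySem.Set.ofList_nil]
  | cons x t ih =>
    rw [PySem.Set.ofList_cons]
    exact List.Sublist.cons₂ x (List.Sublist.trans List.filter_sublist ih)

-- len(xs) == len(set(xs)) is exactly Nodup
theorem pv_len_ofList_iff (xs : List (Int × Int)) :
    (PySem.Set.ofList xs).length = xs.length ↔ xs.Nodup := by
  constructor
  · intro h
    have heq := (pv_ofList_sublist xs).eq_of_length h
    rw [← heq]; exact PySem.Set.nodup_ofList xs
  · intro h; rw [PySem.Set.ofList_eq_self_of_nodup xs h]

-- invariant of A's loop: it answers whether the remaining positions are pairwise fresh and avoid `visited`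
theorem pv_go_eq (l : List (Int × Int)) : ∀ (x y : Int) (visited : PySem.Set (Int × Int)),
    isaGo x y l visited =
      decide ((bPositions x y l).Nodup ∧ ∀ z ∈ bPositions x y l, z ∉ visited) := by
  induction l with
  | nil => intro x y visited; simp [isaGo, bPositions]
  | cons hd rest ih =>
    intro x y visited
    obtain ⟨dx, dy⟩ := hd
    simp only [isaGo, bPositions]
    by_cases hmem : (x + dx, y + dy) ∈ visited
    · simp [hmem]
    · rw [if_neg hmem, ih]
      rw [decide_eq_decide]
      simp only [List.nodup_cons, List.mem_cons, PySem.Set.mem_add]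
      constructor
      · rintro ⟨hnd, hall⟩
        refine ⟨⟨fun hc => (hall _ hc) (Or.inr rfl), hnd⟩, fun z hz => ?_⟩
        rcases hz with hz | hz
        · exact hz ▸ hmem
        · intro hv; exact (hall z hz) (Or.inl hv)
      · rintro ⟨⟨hnotin, hnd⟩, hall⟩
        refine ⟨hnd, fun z hz hv => ?_⟩
        rcases hv with hv | hv
        · exact (hall z (Or.inr hz)) hv
        · exact hnotin (hv ▸ hz)

-- ===== VERDICT (by name: the statement is the Claim_ definition above) =====
theorem is_self_avoiding_spec : Claim_equal_is_self_avoiding := by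
  intro path _
  unfold Spec_is_self_avoiding is_self_avoiding is_self_avoiding_alt
  rw [pv_go_eq]
  rw [decide_eq_decide]
  rw [eq_comm, pv_len_ofList_iff, List.nodup_cons]
  have hset : PySem.Set.ofList [((0 : Int), (0 : Int))] = [((0 : Int), (0 : Int))] := by decide
  rw [hset]
  simp only [List.mem_singleton]
  constructor
  · rintro ⟨hnd, hall⟩
    exact ⟨fun hc => (hall _ hc) rfl, hnd⟩
  · rintro ⟨hnotin, hnd⟩
    exact ⟨hnd, fun z hz hv => hnotin (hv ▸ hz)⟩
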